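-- pv_equiv track=rewrite | github.com/Priivacy-ai/spec-kitty | src/charter/synthesizer/artifact_naming.py | extract_directive_number
-- ===== SOURCE A (Python) =====
-- def extract_directive_number(artifact_id: str | None) -> str:
--     """Return the numeric directive segment from an artifact ID.
--
--     Valid directive IDs contain an uppercase prefix followed by ``_`` and one or
--     more digits, for example ``PROJECT_001``. When no such segment is present,
--     the safe fallback is ``"000"``.
--     """
--     if not artifact_id:
--         return "000"
--
--     length = len(artifact_id)
--     index = 0
--     while index < length:
--         start = index
--         while index < length and artifact_id[index].isupper():
--             index += 1
--         if index == start or index >= length or artifact_id[index] != "_":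
--             index = start + 1
--             continue
--
--         digits_start = index + 1
--         digits_end = digits_start
--         while digits_end < length and artifact_id[digits_end].isdigit():
--             digits_end += 1
--         if digits_end > digits_start:
--             return artifact_id[digits_start:digits_end].zfill(3)
--
--         index = digits_start
--
--     return "000"
-- ===== SOURCE B (Python) =====
-- def extract_directive_number(artifact_id):
--     """Scan underscore positions instead of uppercase runs: the leftmost '_'
--     immediately preceded by an uppercase letter and followed by a digit marks
--     the directive number (the maximal digit run after it), zfilled to 3."""
--     if not artifact_id:
--         return "000"
--     n = len(artifact_id)
--     for j in range(1, n - 1):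
--         if artifact_id[j] == "_" and artifact_id[j - 1].isupper() and artifact_id[j + 1].isdigit():
--             k = j + 1
--             while k < n and artifact_id[k].isdigit():
--                 k += 1
--             return artifact_id[j + 1:k].zfill(3)
--     return "000"
-- ===== Notes on version B (the rewrite author's own statement) =====
-- stated objective: simpler
-- what changed: B anchors on underscore positions (one forward pass testing each position for '_' with an uppercase char before and a digit after) instead of A's scan of maximal uppercase runs with restart/backtracking bookkeeping.
import Mathlib
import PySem

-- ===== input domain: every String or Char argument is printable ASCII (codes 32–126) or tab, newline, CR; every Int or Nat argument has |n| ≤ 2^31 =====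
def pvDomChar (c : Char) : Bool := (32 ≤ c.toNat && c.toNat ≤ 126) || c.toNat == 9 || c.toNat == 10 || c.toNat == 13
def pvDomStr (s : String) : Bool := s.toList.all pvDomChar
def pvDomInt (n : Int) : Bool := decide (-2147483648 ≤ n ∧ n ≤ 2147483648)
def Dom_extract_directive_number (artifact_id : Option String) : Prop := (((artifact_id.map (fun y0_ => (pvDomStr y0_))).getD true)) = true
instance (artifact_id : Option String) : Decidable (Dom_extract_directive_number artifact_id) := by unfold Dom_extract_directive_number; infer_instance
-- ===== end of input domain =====

-- B anchors on underscore positions instead of A's maximal-uppercase-run scan with restarts; objective: simpler.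

-- ===== PORT A =====
-- inner 'while index < length and artifact_id[index].isupper(): index += 1'
def pvScanUpperA (cs : List Char) (i : Nat) : Nat :=
  if i < cs.length ∧ (PySem.Chars.isupper (cs.getD i ' ')) then pvScanUpperA cs (i + 1) else i
termination_by cs.length - i
decreasing_by omega

-- inner 'while digits_end < length and artifact_id[digits_end].isdigit(): digits_end += 1'
def pvScanDigitsA (cs : List Char) (i : Nat) : Nat :=
  if i < cs.length ∧ (PySem.Chars.isdigit (cs.getD i ' ')) then pvScanDigitsA cs (i + 1) else i
termination_by cs.length - i
decreasing_by omega

theorem pvScanUpperA_ge (cs : List Char) (i : Nat) : i ≤ pvScanUpperA cs i := by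
  unfold pvScanUpperA
  split
  · have := pvScanUpperA_ge cs (i + 1); omega
  · exact le_refl i
termination_by cs.length - i
decreasing_by
  rename_i h; omega

-- outer while loop of A; index-in-range accesses are via getD (exact: all guarded)
def pvLoopA (cs : List Char) (index : Nat) : String :=
  if index < cs.length then
    let start := index
    let idx := pvScanUpperA cs index
    if idx = start ∨ ¬ idx < cs.length ∨ cs.getD idx ' ' ≠ '_' then
      pvLoopA cs (start + 1)
    else
      let digits_start := idx + 1
      let digits_end := pvScanDigitsA cs digits_start
      if digits_start < digits_end then
        -- artifact_id[digits_start:digits_end].zfill(3); 0 ≤ a ≤ b so the slice is drop/take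
        String.ofList (PySem.Chars.zfill ((cs.drop digits_start).take (digits_end - digits_start)) 3)
      else
        pvLoopA cs digits_start
  else "000"
termination_by cs.length - index
decreasing_by
  all_goals (have := pvScanUpperA_ge cs index; omega)

def extract_directive_number (artifact_id : Option String) : String :=
  match artifact_id with
  | none => "000"
  | some s => if s.toList = [] then "000" else pvLoopA s.toList 0

-- ===== PORT B =====
-- 'while k < n and artifact_id[k].isdigit(): k += 1'
def pvScanDigitsB (cs : List Char) (k : Nat) : Nat :=
  if k < cs.length ∧ (PySem.Chars.isdigit (cs.getD k ' ')) then pvScanDigitsB cs (k + 1) else k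
termination_by cs.length - k
decreasing_by omega

-- 'for j in range(1, n - 1)' with early return
def pvLoopB (cs : List Char) (j : Nat) : String :=
  if j < cs.length - 1 then
    if cs.getD j ' ' = '_' ∧ PySem.Chars.isupper (cs.getD (j - 1) ' ')
        ∧ PySem.Chars.isdigit (cs.getD (j + 1) ' ') then
      let k := pvScanDigitsB cs (j + 1)
      String.ofList (PySem.Chars.zfill ((cs.drop (j + 1)).take (k - (j + 1))) 3)
    else pvLoopB cs (j + 1)
  else "000"
termination_by cs.length - j
decreasing_by omega

def extract_directive_number_alt (artifact_id : Option String) : String :=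
  match artifact_id with
  | none => "000"
  | some s => if s.toList = [] then "000" else pvLoopB s.toList 1

-- ===== PRECONDITION & SPEC =====
def Spec_extract_directive_number (artifact_id : Option String) (out : String) : Prop := out = extract_directive_number_alt artifact_id
instance (artifact_id : Option String) (out : String) : Decidable (Spec_extract_directive_number artifact_id out) := by unfold Spec_extract_directive_number; infer_instance

-- ===== CLAIM (what is proved, stated in full; the proofs are below) =====
def Claim_equal_extract_directive_number : Prop := ∀ (artifact_id : Option String), Dom_extract_directive_number artifact_id → Spec_extract_directive_number artifact_id (extract_directive_number artifact_id)

-- ===== LEMMAS AND PROOFS =====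

-- the match condition B tests at position j
def pvMatchAt (cs : List Char) (j : Nat) : Prop :=
  cs.getD j ' ' = '_' ∧ 1 ≤ j ∧ PySem.Chars.isupper (cs.getD (j - 1) ' ')
    ∧ j + 1 < cs.length ∧ PySem.Chars.isdigit (cs.getD (j + 1) ' ')

theorem pvScanDigits_eq (cs : List Char) (i : Nat) : pvScanDigitsA cs i = pvScanDigitsB cs i := by
  unfold pvScanDigitsA pvScanDigitsB
  split
  · exact pvScanDigits_eq cs (i + 1)
  · rfl
termination_by cs.length - i
decreasing_by rename_i h; omega

theorem pvScanUpperA_upper (cs : List Char) (i j : Nat) (h1 : i ≤ j) (h2 : j < pvScanUpperA cs i) :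
    PySem.Chars.isupper (cs.getD j ' ') := by
  rw [pvScanUpperA] at h2
  split at h2
  · rename_i hc
    rcases Nat.eq_or_lt_of_le h1 with he | hl
    · exact he ▸ hc.2
    · exact pvScanUpperA_upper cs (i + 1) j hl h2
  · omega
termination_by cs.length - i
decreasing_by omega

theorem pvScanDigitsA_ge (cs : List Char) (i : Nat) : i ≤ pvScanDigitsA cs i := by
  unfold pvScanDigitsA
  split
  · have := pvScanDigitsA_ge cs (i + 1); omega
  · exact le_refl i
termination_by cs.length - i
decreasing_by rename_i h; omega

theorem pvScanDigitsA_succ (cs : List Char) (i : Nat) (h1 : i < cs.length)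
    (h2 : PySem.Chars.isdigit (cs.getD i ' ')) : i < pvScanDigitsA cs i := by
  rw [pvScanDigitsA, if_pos ⟨h1, h2⟩]
  have := pvScanDigitsA_ge cs (i + 1); omega

theorem pvScanDigitsA_lt_imp (cs : List Char) (i : Nat) (h : i < pvScanDigitsA cs i) :
    i < cs.length ∧ PySem.Chars.isdigit (cs.getD i ' ') := by
  rw [pvScanDigitsA] at h
  split at h
  · assumption
  · omega

theorem pvLoopB_step (cs : List Char) (i : Nat) (hni : ¬ pvMatchAt cs i) :
    pvLoopB cs i = pvLoopB cs (i + 1) := by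
  by_cases hg : i < cs.length - 1
  · conv_lhs => rw [pvLoopB]
    rw [if_pos hg, if_neg ?_]
    rintro ⟨c1, c2, c3⟩
    match i with
    | 0 => rw [c1] at c2; exact absurd c2 (by decide)
    | Nat.succ m => exact hni ⟨c1, by omega, c2, by omega, c3⟩
  · conv_lhs => rw [pvLoopB]
    conv_rhs => rw [pvLoopB]
    rw [if_neg hg, if_neg (by omega)]

theorem pvLoopB_skip (cs : List Char) (i m : Nat) (him : i ≤ m)
    (hno : ∀ j, i ≤ j → j < m → ¬ pvMatchAt cs j) : pvLoopB cs i = pvLoopB cs m := by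
  rcases Nat.eq_or_lt_of_le him with he | hl
  · rw [he]
  · rw [pvLoopB_step cs i (hno i (le_refl i) hl)]
    exact pvLoopB_skip cs (i + 1) m hl (fun j hj1 hj2 => hno j (by omega) hj2)
termination_by m - i

theorem pv_upper_ne_underscore (cs : List Char) (j : Nat)
    (hu : PySem.Chars.isupper (cs.getD j ' ')) : cs.getD j ' ' ≠ '_' := by
  intro he; rw [he] at hu; exact absurd hu (by decide)

-- main invariant: A's loop from index i agrees with B's scan from i when i itself is no match
theorem pvLoop_agree (cs : List Char) (i : Nat) (hni : ¬ pvMatchAt cs i) :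
    pvLoopA cs i = pvLoopB cs i := by
  rw [pvLoopA]
  split
  case isFalse h =>
    rw [pvLoopB, if_neg (by omega)]
  case isTrue h =>
    dsimp only
    split
    case isTrue hbr =>
      -- continue at start + 1
      have hni1 : ¬ pvMatchAt cs (i + 1) := by
        rintro ⟨c1, _, c2, c4, c5⟩
        simp only [Nat.add_sub_cancel] at c2
        have hu : pvScanUpperA cs i = i + 1 := by
          rw [pvScanUpperA, if_pos ⟨h, c2⟩, pvScanUpperA, if_neg ?_]
          rintro ⟨_, hup⟩
          exact pv_upper_ne_underscore cs (i + 1) hup c1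
        rcases hbr with he | hn | hc
        · omega
        · omega
        · exact hc (hu ▸ c1)
      rw [pvLoop_agree cs (i + 1) hni1, ← pvLoopB_step cs i hni]
    case isFalse hbr =>
      rw [not_or, not_or, not_not] at hbr
      obtain ⟨hbr1, hbr2⟩ := hbr
      obtain ⟨hne, hlt, hus⟩ : ¬ _ ∧ _ ∧ _ := ⟨hbr1, hbr2.1, not_not.mp hbr2.2⟩
      have hge := pvScanUpperA_ge cs i
      have higt : i < pvScanUpperA cs i := by omega
      have hupper : ∀ j, i ≤ j → j < pvScanUpperA cs i → ¬ pvMatchAt cs j := by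
        intro j h1 h2 hM
        exact pv_upper_ne_underscore cs j (pvScanUpperA_upper cs i j h1 h2) hM.1
      split
      case isTrue hd =>
        -- A returns: B must reach position u := pvScanUpperA cs i and return the same
        have hdig := pvScanDigitsA_lt_imp cs (pvScanUpperA cs i + 1) hd
        have hM : pvMatchAt cs (pvScanUpperA cs i) :=
          ⟨hus, by omega, by
            simpa using pvScanUpperA_upper cs i (pvScanUpperA cs i - 1) (by omega) (by omega),
           hdig.1, hdig.2⟩
        rw [pvLoopB_skip cs i (pvScanUpperA cs i) (by omega) hupper]
        rw [pvLoopB, if_pos (by omega), if_pos ⟨hus, hM.2.2.1, hM.2.2.2.2⟩]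
        rw [pvScanDigits_eq]
      case isFalse hd =>
        -- no digits after the underscore: both skip past it
        have hn1 : ¬ pvMatchAt cs (pvScanUpperA cs i + 1) := by
          rintro ⟨_, _, c2, _, _⟩
          simp only [Nat.add_sub_cancel] at c2
          exact pv_upper_ne_underscore cs (pvScanUpperA cs i) c2 hus
        rw [pvLoop_agree cs (pvScanUpperA cs i + 1) hn1]
        rw [pvLoopB_skip cs i (pvScanUpperA cs i + 1) (by omega) ?_]
        intro j h1 h2 hM
        rcases Nat.lt_or_ge j (pvScanUpperA cs i) with hj | hj
        · exact hupper j h1 hj hM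
        · have hju : j = pvScanUpperA cs i := by omega
          rw [hju] at hM
          exact hd (pvScanDigitsA_succ cs (pvScanUpperA cs i + 1) hM.2.2.2.1 hM.2.2.2.2)
termination_by cs.length - i
decreasing_by
  · omega
  · have := pvScanUpperA_ge cs i; omega

-- ===== VERDICT (by name: the statement is the Claim_ definition above) =====
theorem extract_directive_number_spec : Claim_equal_extract_directive_number := by
  intro artifact_id _
  unfold Spec_extract_directive_number extract_directive_number extract_directive_number_alt
  match artifact_id with
  | none => rfl
  | some s =>
    simp only
    split
    · rfl
    · have h0 : ¬ pvMatchAt s.toList 0 := fun hM => by have := hM.2.1; omega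
      rw [pvLoop_agree s.toList 0 h0, pvLoopB_step s.toList 0 h0]
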